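-- pv_equiv track=rewrite | github.com/Ottobon-INC/Whatsapp_backend | modules/response_builder.py | is_mostly_english
-- ===== SOURCE A (Python) =====
-- def is_mostly_english(text: str) -> bool:
--     """
--     Check if text is predominantly English using common stopwords.
--     Returns True if English stopwords appear frequently.
--     """
--     english_stopwords = {"the", "is", "and", "of", "to", "in", "it", "that", "for", "with", "are", "on", "as", "at", "be", "this", "have", "from"}
--     words = text.lower().replace(".", " ").replace(",", " ").split()
--     if not words:
--         return False
--
--     english_count = sum(1 for w in words if w in english_stopwords)
--     ratio = english_count / len(words)
--
--     # If more than 15% of words are core English stopwords, it's likely English sentences.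
--     # Tinglish might have 'is' or 'and' but rarely 'the', 'of', 'for' in valid grammatical positions.
--     return ratio > 0.15
-- ===== SOURCE B (Python) =====
-- def is_mostly_english(text: str) -> bool:
--     """
--     Check if text is predominantly English using common stopwords.
--     Returns True if English stopwords appear frequently.
--     """
--     english_stopwords = ["the", "is", "and", "of", "to", "in", "it", "that", "for", "with", "are", "on", "as", "at", "be", "this", "have", "from"]
--     words = text.lower().replace(".", " ").replace(",", " ").split()
--     if not words:
--         return False
--
--     # one counting pass over the words, then look up each stopword in the table
--     counts = {}
--     for w in words:
--         counts[w] = counts.get(w, 0) + 1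
--     english_count = sum(counts.get(w, 0) for w in english_stopwords)
--     ratio = english_count / len(words)
--     return ratio > 0.15
-- ===== Notes on version B (the rewrite author's own statement) =====
-- stated objective: alternative
-- what changed: Instead of testing every word for membership in the stopword set, B builds a frequency table of the words in one pass and then sums the counts of the 18 fixed stopwords looked up in that table.
import Mathlib
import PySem

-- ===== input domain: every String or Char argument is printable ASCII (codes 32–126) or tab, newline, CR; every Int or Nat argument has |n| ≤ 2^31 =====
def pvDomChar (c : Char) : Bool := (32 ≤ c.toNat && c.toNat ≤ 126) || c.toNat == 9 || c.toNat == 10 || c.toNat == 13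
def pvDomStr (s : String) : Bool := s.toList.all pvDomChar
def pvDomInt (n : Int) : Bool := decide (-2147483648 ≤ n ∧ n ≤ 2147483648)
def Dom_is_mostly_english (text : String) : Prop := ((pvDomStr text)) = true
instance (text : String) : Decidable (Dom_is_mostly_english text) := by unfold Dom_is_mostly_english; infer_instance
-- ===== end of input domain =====

-- B replaces the per-word membership test with one counting pass over the words plus a
-- lookup of each of the 18 fixed stopwords in the frequency table (objective: alternative).
-- In both ports 'english_count / len(words) > 0.15' is ported exactly as
-- 20 * english_count > 3 * len(words): for 0 ≤ c ≤ n the float comparison c/n > 0.15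
-- agrees with the integer one (0.15 has no closer rational with such a small denominator).

def pvStopwords : List String :=
  ["the", "is", "and", "of", "to", "in", "it", "that", "for", "with",
   "are", "on", "as", "at", "be", "this", "have", "from"]

def pvWords (text : String) : List String :=
  PySem.Str.split₀ (PySem.Str.replace (PySem.Str.replace (PySem.Str.lower text) "." " ") "," " ")

-- ===== PORT A =====
def is_mostly_english (text : String) : Bool :=
  let english_stopwords : PySem.Set String := PySem.Set.ofList pvStopwords
  let words := pvWords text
  if words = [] then false
  else
    let english_count : Int :=
      (words.map (fun w => if decide (w ∈ english_stopwords) then (1 : Int) else 0)).sum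
    decide (20 * english_count > 3 * (words.length : Int))

-- ===== PORT B =====
def is_mostly_english_alt (text : String) : Bool :=
  let words := pvWords text
  if words = [] then false
  else
    let counts : PySem.Dict String Int :=
      words.foldl (fun d w => d.modify w 0 (· + 1)) PySem.Dict.empty
    let english_count : Int := (pvStopwords.map (fun w => counts.getD w 0)).sum
    decide (20 * english_count > 3 * (words.length : Int))

-- ===== PRECONDITION & SPEC =====
def Spec_is_mostly_english (text : String) (out : Bool) : Prop := out = is_mostly_english_alt text
instance (text : String) (out : Bool) : Decidable (Spec_is_mostly_english text out) := by unfold Spec_is_mostly_english; infer_instance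

-- ===== CLAIM (what is proved, stated in full; the proofs are below) =====
def Claim_equal_is_mostly_english : Prop := ∀ (text : String), Dom_is_mostly_english text → Spec_is_mostly_english text (is_mostly_english text)

-- ===== LEMMAS AND PROOFS =====

-- summing, over the Nodup stopword list, each word-count of the text equals A's 0/1 sum over the words
theorem pv_sum_count (sw : List String) (hsw : sw.Nodup) (words : List String) :
    (sw.map (fun w => (words.count w : Int))).sum
      = (words.map (fun w => if decide (w ∈ sw) then (1 : Int) else 0)).sum := by
  induction words with
  | nil => simp
  | cons x ws ih =>
    have hsplit : (sw.map (fun w => ((x :: ws).count w : Int))).sum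
        = (sw.map (fun w => (ws.count w : Int))).sum
          + (sw.map (fun w => if decide (w ∈ [x]) then (1 : Int) else 0)).sum := by
      rw [← List.sum_map_add]
      apply congrArg List.sum
      apply List.map_congr_left
      intro w _
      by_cases hw : w = x
      · simp [hw]
      · simp [hw, Ne.symm hw]
    have hone : (sw.map (fun w => if decide (w ∈ [x]) then (1 : Int) else 0)).sum
        = if decide (x ∈ sw) then (1 : Int) else 0 := by
      rw [PySem.List.sum_map_ite_one_zero (fun w => decide (w ∈ [x])) sw]
      have hcp : List.countP (fun w => decide (w ∈ [x])) sw = List.count x sw := by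
        rw [List.count]
        apply List.countP_congr
        intro a _
        simp
      by_cases hx : x ∈ sw
      · rw [hcp, List.count_eq_one_of_mem hsw hx]; simp [hx]
      · rw [hcp, List.count_eq_zero_of_not_mem hx]; simp [hx]
    simp only [List.map_cons, List.sum_cons] at *
    rw [hsplit, ih, hone]
    ring

theorem pv_stopwords_nodup : pvStopwords.Nodup := by decide

-- ===== VERDICT (by name: the statement is the Claim_ definition above) =====
theorem is_mostly_english_spec : Claim_equal_is_mostly_english := by
  intro text _
  unfold Spec_is_mostly_english is_mostly_english is_mostly_english_alt
  simp only
  by_cases h : pvWords text = []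
  · rw [if_pos h, if_pos h]
  · rw [if_neg h, if_neg h]
    have hlook : pvStopwords.map (fun w =>
        ((pvWords text).foldl (fun d w => d.modify w 0 (· + 1)) PySem.Dict.empty).getD w 0)
        = pvStopwords.map (fun w => ((pvWords text).count w : Int)) := by
      apply List.map_congr_left
      intro w _
      rw [PySem.Dict.getD_foldl_modify_add_one, PySem.Dict.getD_empty]
      ring
    have hA : (pvWords text).map (fun w => if decide (w ∈ PySem.Set.ofList pvStopwords) then (1 : Int) else 0)
        = (pvWords text).map (fun w => if decide (w ∈ pvStopwords) then (1 : Int) else 0) := by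
      apply List.map_congr_left
      intro w _
      simp [PySem.Set.mem_ofList]
    rw [hlook, pv_sum_count pvStopwords pv_stopwords_nodup, hA]
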